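-- pv_equiv track=rewrite | github.com/sarojghoshdk/Python_Code | Fascinating_Number.py | check_fascinating
-- ===== SOURCE A (Python) =====
-- def check_fascinating(num):
--
--     concat = str(num) + str(num*2) + str(num*3)
--
--     if "0" in concat:
--         return "Not Fascinating Number"
--     if len(concat) > 9:
--         return "Not Fascinating Number"
--     for i in range(1,10):
--         if str(i) not in concat:
--             return "Not Fascinating Number"
--
--     return "Fascinating Number"
-- ===== SOURCE B (Python) =====
-- def check_fascinating(num):
--     concat = str(num) + str(num * 2) + str(num * 3)
--     if sorted(concat) == list("123456789"):
--         return "Fascinating Number"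
--     return "Not Fascinating Number"
-- ===== Notes on version B (the rewrite author's own statement) =====
-- stated objective: simpler
-- what changed: Replaces A's zero-check, length check and 1..9 membership loop by a single canonical-form test: sort the concatenation once and compare it to '123456789'.
import Mathlib
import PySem

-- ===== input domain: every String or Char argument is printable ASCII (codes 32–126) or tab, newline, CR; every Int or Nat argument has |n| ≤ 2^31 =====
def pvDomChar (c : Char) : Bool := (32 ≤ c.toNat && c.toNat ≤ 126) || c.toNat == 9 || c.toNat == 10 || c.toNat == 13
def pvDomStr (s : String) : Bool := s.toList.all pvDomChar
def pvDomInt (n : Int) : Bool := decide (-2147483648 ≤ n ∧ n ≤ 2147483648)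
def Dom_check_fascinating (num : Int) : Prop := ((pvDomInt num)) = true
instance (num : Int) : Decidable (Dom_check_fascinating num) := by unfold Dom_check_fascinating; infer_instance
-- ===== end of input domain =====

-- B collapses A's zero-check, length check and 1..9 membership loop into one sorted-canonical-form comparison; same value on every input.

-- ===== PORT A =====
-- the 'for i in range(1,10): if str(i) not in concat: return …' loop, with its early return
def fascLoopA (is : List Int) (concat : List Char) : String :=
  match is with
  | [] => "Fascinating Number"
  | i :: rest =>
    if PySem.Chars.isIn (PySem.Int.toChars i) concat = false then "Not Fascinating Number"
    else fascLoopA rest concat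

def check_fascinating (num : Int) : String :=
  let concat := PySem.Int.toChars num ++ PySem.Int.toChars (num * 2) ++ PySem.Int.toChars (num * 3)
  if PySem.Chars.isIn ['0'] concat then "Not Fascinating Number"
  else if concat.length > 9 then "Not Fascinating Number"
  else fascLoopA (PySem.List.pyRange 1 10 1) concat

-- ===== PORT B =====
def check_fascinating_alt (num : Int) : String :=
  let concat := PySem.Int.toChars num ++ PySem.Int.toChars (num * 2) ++ PySem.Int.toChars (num * 3)
  if PySem.List.sorted concat (fun c => c) false = "123456789".toList then "Fascinating Number"
  else "Not Fascinating Number"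

-- ===== PRECONDITION & SPEC =====
def Spec_check_fascinating (num : Int) (out : String) : Prop := out = check_fascinating_alt num
instance (num : Int) (out : String) : Decidable (Spec_check_fascinating num out) := by unfold Spec_check_fascinating; infer_instance

-- ===== CLAIM (what is proved, stated in full; the proofs are below) =====
def Claim_equal_check_fascinating : Prop := ∀ (num : Int), Dom_check_fascinating num → Spec_check_fascinating num (check_fascinating num)

-- ===== LEMMAS AND PROOFS =====

-- the single-character 'c in s' checks of A are membership
lemma isIn_singleton (c : Char) (l : List Char) :
    PySem.Chars.isIn [c] l = true ↔ c ∈ l := by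
  rw [PySem.Chars.isIn_iff_infix]
  constructor
  · exact fun h => h.mem (List.mem_singleton_self c)
  · intro h
    obtain ⟨s, t, rfl⟩ := List.append_of_mem h
    exact ⟨s, t, by simp⟩

lemma pyRange_1_10 : PySem.List.pyRange 1 10 1 = [1,2,3,4,5,6,7,8,9] := by decide

lemma fascLoopA_not (is : List Int) (l : List Char)
    (h : ∃ i ∈ is, PySem.Chars.isIn (PySem.Int.toChars i) l = false) :
    fascLoopA is l = "Not Fascinating Number" := by
  induction is with
  | nil => simp at h
  | cons i rest ih =>
    obtain ⟨j, hj, hjf⟩ := h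
    simp only [fascLoopA]
    by_cases hb : PySem.Chars.isIn (PySem.Int.toChars i) l = false
    · rw [if_pos hb]
    · rw [if_neg hb]
      apply ih
      rcases List.mem_cons.mp hj with rfl | hj'
      · exact absurd hjf hb
      · exact ⟨j, hj', hjf⟩

lemma fascLoopA_all (is : List Int) (l : List Char)
    (h : ∀ i ∈ is, PySem.Chars.isIn (PySem.Int.toChars i) l = true) :
    fascLoopA is l = "Fascinating Number" := by
  induction is with
  | nil => rfl
  | cons i rest ih =>
    simp only [fascLoopA]
    rw [if_neg (by rw [h i (List.mem_cons_self)]; simp)]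
    exact ih fun j hj => h j (List.mem_cons_of_mem i hj)

-- A = B for an arbitrary character list in place of the concatenation
lemma core (l : List Char) :
    (if PySem.Chars.isIn ['0'] l then "Not Fascinating Number"
     else if l.length > 9 then "Not Fascinating Number"
     else fascLoopA (PySem.List.pyRange 1 10 1) l) =
    (if PySem.List.sorted l (fun c => c) false = "123456789".toList then "Fascinating Number"
     else "Not Fascinating Number") := by
  have tl : "123456789".toList = ['1','2','3','4','5','6','7','8','9'] := by decide
  by_cases hs : PySem.List.sorted l (fun c => c) false = "123456789".toList
  · -- B accepts: l is a permutation of "123456789", so all of A's tests pass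
    have hperm : l.Perm "123456789".toList := by
      have := PySem.List.sorted_perm l (fun c : Char => c) false
      rw [hs] at this; exact this.symm
    have hmem : ∀ c : Char, c ∈ l ↔ c ∈ "123456789".toList :=
      fun c => hperm.mem_iff
    have hlen : l.length = 9 := by
      have := hperm.length_eq; simpa using this
    rw [hs]
    have h0 : PySem.Chars.isIn ['0'] l = false := by
      rw [← Bool.not_eq_true, isIn_singleton]
      intro h; rw [hmem] at h; revert h; decide
    rw [h0, if_neg (by simp), if_neg (by omega), pyRange_1_10]
    apply fascLoopA_all
    intro i hi
    rcases (by simpa using hi : i = 1 ∨ i = 2 ∨ i = 3 ∨ i = 4 ∨ i = 5 ∨ i = 6 ∨ i = 7 ∨ i = 8 ∨ i = 9) with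
      rfl | rfl | rfl | rfl | rfl | rfl | rfl | rfl | rfl <;>
      first
      | (rw [show PySem.Int.toChars 1 = ['1'] from by decide, isIn_singleton, hmem]; decide)
      | (rw [show PySem.Int.toChars 2 = ['2'] from by decide, isIn_singleton, hmem]; decide)
      | (rw [show PySem.Int.toChars 3 = ['3'] from by decide, isIn_singleton, hmem]; decide)
      | (rw [show PySem.Int.toChars 4 = ['4'] from by decide, isIn_singleton, hmem]; decide)
      | (rw [show PySem.Int.toChars 5 = ['5'] from by decide, isIn_singleton, hmem]; decide)
      | (rw [show PySem.Int.toChars 6 = ['6'] from by decide, isIn_singleton, hmem]; decide)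
      | (rw [show PySem.Int.toChars 7 = ['7'] from by decide, isIn_singleton, hmem]; decide)
      | (rw [show PySem.Int.toChars 8 = ['8'] from by decide, isIn_singleton, hmem]; decide)
      | (rw [show PySem.Int.toChars 9 = ['9'] from by decide, isIn_singleton, hmem]; decide)
  · -- B rejects: show A rejects too
    rw [if_neg hs]
    by_cases h0 : PySem.Chars.isIn ['0'] l = true
    · rw [if_pos h0]
    · rw [if_neg h0]
      by_cases hlen : l.length > 9
      · rw [if_pos hlen]
      · rw [if_neg hlen]
        by_cases hall : ∀ c ∈ "123456789".toList, c ∈ l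
        · -- then l would be a permutation of "123456789", contradicting hs
          exfalso
          apply hs
          have hsub : "123456789".toList ⊆ l := fun c hc => hall c hc
          have hnd : ("123456789".toList).Nodup := by decide
          have hsp : List.Subperm "123456789".toList l := List.subperm_of_subset hnd hsub
          have hperm : List.Perm "123456789".toList l := by
            apply hsp.perm_of_length_le
            have h9 : ("123456789".toList).length = 9 := by decide
            omega
          exact PySem.List.sorted_eq_of_perm_of_pairwise_lt l "123456789".toList (fun c => c) hperm (by decide)
        · -- some digit is missing: the loop rejects there
          rw [pyRange_1_10]
          apply fascLoopA_not
          rw [Classical.not_forall] at hall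
          obtain ⟨c, hcall⟩ := hall
          rw [Classical.not_imp] at hcall
          obtain ⟨hc, hcl⟩ := hcall
          rw [tl] at hc
          have hmiss : PySem.Chars.isIn [c] l = false := by
            rw [← Bool.not_eq_true, isIn_singleton]; exact hcl
          rcases (by simpa using hc : c = '1' ∨ c = '2' ∨ c = '3' ∨ c = '4' ∨ c = '5' ∨ c = '6' ∨ c = '7' ∨ c = '8' ∨ c = '9') with
            rfl | rfl | rfl | rfl | rfl | rfl | rfl | rfl | rfl <;>
            first
            | exact ⟨1, by decide, by rw [show PySem.Int.toChars 1 = ['1'] from by decide]; exact hmiss⟩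
            | exact ⟨2, by decide, by rw [show PySem.Int.toChars 2 = ['2'] from by decide]; exact hmiss⟩
            | exact ⟨3, by decide, by rw [show PySem.Int.toChars 3 = ['3'] from by decide]; exact hmiss⟩
            | exact ⟨4, by decide, by rw [show PySem.Int.toChars 4 = ['4'] from by decide]; exact hmiss⟩
            | exact ⟨5, by decide, by rw [show PySem.Int.toChars 5 = ['5'] from by decide]; exact hmiss⟩
            | exact ⟨6, by decide, by rw [show PySem.Int.toChars 6 = ['6'] from by decide]; exact hmiss⟩
            | exact ⟨7, by decide, by rw [show PySem.Int.toChars 7 = ['7'] from by decide]; exact hmiss⟩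
            | exact ⟨8, by decide, by rw [show PySem.Int.toChars 8 = ['8'] from by decide]; exact hmiss⟩
            | exact ⟨9, by decide, by rw [show PySem.Int.toChars 9 = ['9'] from by decide]; exact hmiss⟩

-- ===== VERDICT (by name: the statement is the Claim_ definition above) =====
theorem check_fascinating_spec : Claim_equal_check_fascinating := by
  intro num _
  unfold Spec_check_fascinating check_fascinating check_fascinating_alt
  exact core _
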